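-- pv_equiv track=rewrite | github.com/Tim7880/aethorias_chronicle | api/app/game_data/sorcerer_progression.py | get_sorcerer_max_spell_level_can_learn
-- ===== SOURCE A (Python) =====
-- SORCERER_SPELL_SLOTS_TABLE = {
--     1:  {1: 2, 2: 0, 3: 0, 4: 0, 5: 0, 6: 0, 7: 0, 8: 0, 9: 0},
--     2:  {1: 3, 2: 0, 3: 0, 4: 0, 5: 0, 6: 0, 7: 0, 8: 0, 9: 0},
--     3:  {1: 4, 2: 2, 3: 0, 4: 0, 5: 0, 6: 0, 7: 0, 8: 0, 9: 0},
--     4:  {1: 4, 2: 3, 3: 0, 4: 0, 5: 0, 6: 0, 7: 0, 8: 0, 9: 0},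
--     5:  {1: 4, 2: 3, 3: 2, 4: 0, 5: 0, 6: 0, 7: 0, 8: 0, 9: 0},
--     6:  {1: 4, 2: 3, 3: 3, 4: 0, 5: 0, 6: 0, 7: 0, 8: 0, 9: 0},
--     7:  {1: 4, 2: 3, 3: 3, 4: 1, 5: 0, 6: 0, 7: 0, 8: 0, 9: 0},
--     8:  {1: 4, 2: 3, 3: 3, 4: 2, 5: 0, 6: 0, 7: 0, 8: 0, 9: 0},
--     9:  {1: 4, 2: 3, 3: 3, 4: 3, 5: 1, 6: 0, 7: 0, 8: 0, 9: 0},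
--     10: {1: 4, 2: 3, 3: 3, 4: 3, 5: 2, 6: 0, 7: 0, 8: 0, 9: 0}, # Also gain Metamagic
--     11: {1: 4, 2: 3, 3: 3, 4: 3, 5: 2, 6: 1, 7: 0, 8: 0, 9: 0}, # 6th level slot
--     12: {1: 4, 2: 3, 3: 3, 4: 3, 5: 2, 6: 1, 7: 0, 8: 0, 9: 0},
--     13: {1: 4, 2: 3, 3: 3, 4: 3, 5: 2, 6: 1, 7: 1, 8: 0, 9: 0}, # 7th level slot
--     14: {1: 4, 2: 3, 3: 3, 4: 3, 5: 2, 6: 1, 7: 1, 8: 0, 9: 0},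
--     15: {1: 4, 2: 3, 3: 3, 4: 3, 5: 2, 6: 1, 7: 1, 8: 1, 9: 0}, # 8th level slot
--     16: {1: 4, 2: 3, 3: 3, 4: 3, 5: 2, 6: 1, 7: 1, 8: 1, 9: 0},
--     17: {1: 4, 2: 3, 3: 3, 4: 3, 5: 2, 6: 1, 7: 1, 8: 1, 9: 1}, # 9th level slot, Sorcerous Restoration
--     18: {1: 4, 2: 3, 3: 3, 4: 3, 5: 3, 6: 1, 7: 1, 8: 1, 9: 1},
--     19: {1: 4, 2: 3, 3: 3, 4: 3, 5: 3, 6: 2, 7: 1, 8: 1, 9: 1},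
--     20: {1: 4, 2: 3, 3: 3, 4: 3, 5: 3, 6: 2, 7: 2, 8: 1, 9: 1}  # Also gain Sorcerous Restoration
-- }
--
-- def get_sorcerer_max_spell_level_can_learn(sorcerer_level: int) -> int:
--     if not (1 <= sorcerer_level <= 20):
--         return 0 # Or raise error
--
--     slots = SORCERER_SPELL_SLOTS_TABLE.get(sorcerer_level, {})
--     for spell_level in range(9, 0, -1): # Check from 9th level down to 1st
--         if slots.get(spell_level, 0) > 0:
--             return spell_level
--     return 0 # Should not happen for L1+ sorcerers, they always have L1 slots
-- ===== SOURCE B (Python) =====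
-- def get_sorcerer_max_spell_level_can_learn(sorcerer_level: int) -> int:
--     if not (1 <= sorcerer_level <= 20):
--         return 0
--     return min(9, (sorcerer_level + 1) // 2)
-- ===== Notes on version B (the rewrite author's own statement) =====
-- stated objective: simpler
-- what changed: Replaced the 20-row spell-slot table and descending scan over slot levels with the closed-form min(9, (level+1)//2) after the same range guard.
import Mathlib
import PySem

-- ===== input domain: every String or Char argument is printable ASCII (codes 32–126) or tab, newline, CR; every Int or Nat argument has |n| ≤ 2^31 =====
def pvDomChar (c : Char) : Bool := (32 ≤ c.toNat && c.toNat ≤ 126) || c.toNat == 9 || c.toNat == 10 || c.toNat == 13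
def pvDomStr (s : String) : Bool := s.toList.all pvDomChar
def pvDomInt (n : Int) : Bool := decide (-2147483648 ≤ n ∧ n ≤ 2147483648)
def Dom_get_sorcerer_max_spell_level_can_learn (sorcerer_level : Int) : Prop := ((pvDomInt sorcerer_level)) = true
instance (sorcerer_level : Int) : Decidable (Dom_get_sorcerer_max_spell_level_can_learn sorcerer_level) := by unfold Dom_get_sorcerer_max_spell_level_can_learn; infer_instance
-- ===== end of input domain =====

-- B replaces the per-level slot table and descending scan with the closed-form min(9, (level+1)//2); objective: simpler.

-- ===== PORT A =====
def SORCERER_SPELL_SLOTS_TABLE : PySem.Dict Int (PySem.Dict Int Int) :=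
  PySem.Dict.ofList [
    (1,  PySem.Dict.ofList [(1,2),(2,0),(3,0),(4,0),(5,0),(6,0),(7,0),(8,0),(9,0)]),
    (2,  PySem.Dict.ofList [(1,3),(2,0),(3,0),(4,0),(5,0),(6,0),(7,0),(8,0),(9,0)]),
    (3,  PySem.Dict.ofList [(1,4),(2,2),(3,0),(4,0),(5,0),(6,0),(7,0),(8,0),(9,0)]),
    (4,  PySem.Dict.ofList [(1,4),(2,3),(3,0),(4,0),(5,0),(6,0),(7,0),(8,0),(9,0)]),
    (5,  PySem.Dict.ofList [(1,4),(2,3),(3,2),(4,0),(5,0),(6,0),(7,0),(8,0),(9,0)]),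
    (6,  PySem.Dict.ofList [(1,4),(2,3),(3,3),(4,0),(5,0),(6,0),(7,0),(8,0),(9,0)]),
    (7,  PySem.Dict.ofList [(1,4),(2,3),(3,3),(4,1),(5,0),(6,0),(7,0),(8,0),(9,0)]),
    (8,  PySem.Dict.ofList [(1,4),(2,3),(3,3),(4,2),(5,0),(6,0),(7,0),(8,0),(9,0)]),
    (9,  PySem.Dict.ofList [(1,4),(2,3),(3,3),(4,3),(5,1),(6,0),(7,0),(8,0),(9,0)]),
    (10, PySem.Dict.ofList [(1,4),(2,3),(3,3),(4,3),(5,2),(6,0),(7,0),(8,0),(9,0)]),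
    (11, PySem.Dict.ofList [(1,4),(2,3),(3,3),(4,3),(5,2),(6,1),(7,0),(8,0),(9,0)]),
    (12, PySem.Dict.ofList [(1,4),(2,3),(3,3),(4,3),(5,2),(6,1),(7,0),(8,0),(9,0)]),
    (13, PySem.Dict.ofList [(1,4),(2,3),(3,3),(4,3),(5,2),(6,1),(7,1),(8,0),(9,0)]),
    (14, PySem.Dict.ofList [(1,4),(2,3),(3,3),(4,3),(5,2),(6,1),(7,1),(8,0),(9,0)]),
    (15, PySem.Dict.ofList [(1,4),(2,3),(3,3),(4,3),(5,2),(6,1),(7,1),(8,1),(9,0)]),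
    (16, PySem.Dict.ofList [(1,4),(2,3),(3,3),(4,3),(5,2),(6,1),(7,1),(8,1),(9,0)]),
    (17, PySem.Dict.ofList [(1,4),(2,3),(3,3),(4,3),(5,2),(6,1),(7,1),(8,1),(9,1)]),
    (18, PySem.Dict.ofList [(1,4),(2,3),(3,3),(4,3),(5,3),(6,1),(7,1),(8,1),(9,1)]),
    (19, PySem.Dict.ofList [(1,4),(2,3),(3,3),(4,3),(5,3),(6,2),(7,1),(8,1),(9,1)]),
    (20, PySem.Dict.ofList [(1,4),(2,3),(3,3),(4,3),(5,3),(6,2),(7,2),(8,1),(9,1)])]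

-- the 'for spell_level in range(9, 0, -1)' loop with early return
def pvScanDown (slots : PySem.Dict Int Int) : List Int → Int
  | [] => 0
  | spell_level :: rest =>
      if slots.getD spell_level 0 > 0 then spell_level else pvScanDown slots rest

def get_sorcerer_max_spell_level_can_learn (sorcerer_level : Int) : Int :=
  if ¬ (1 ≤ sorcerer_level ∧ sorcerer_level ≤ 20) then 0
  else
    let slots := (SORCERER_SPELL_SLOTS_TABLE.get? sorcerer_level).getD (PySem.Dict.ofList [])
    pvScanDown slots (PySem.List.pyRange 9 0 (-1))

-- ===== PORT B =====
def get_sorcerer_max_spell_level_can_learn_alt (sorcerer_level : Int) : Int :=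
  if ¬ (1 ≤ sorcerer_level ∧ sorcerer_level ≤ 20) then 0
  else min 9 (PySem.Int.floordiv (sorcerer_level + 1) 2)

-- ===== PRECONDITION & SPEC =====
def Spec_get_sorcerer_max_spell_level_can_learn (sorcerer_level : Int) (out : Int) : Prop := out = get_sorcerer_max_spell_level_can_learn_alt sorcerer_level
instance (sorcerer_level : Int) (out : Int) : Decidable (Spec_get_sorcerer_max_spell_level_can_learn sorcerer_level out) := by unfold Spec_get_sorcerer_max_spell_level_can_learn; infer_instance

-- ===== CLAIM (what is proved, stated in full; the proofs are below) =====
def Claim_equal_get_sorcerer_max_spell_level_can_learn : Prop := ∀ (sorcerer_level : Int), Dom_get_sorcerer_max_spell_level_can_learn sorcerer_level → Spec_get_sorcerer_max_spell_level_can_learn sorcerer_level (get_sorcerer_max_spell_level_can_learn sorcerer_level)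

-- ===== LEMMAS AND PROOFS =====

-- ===== VERDICT (by name: the statement is the Claim_ definition above) =====
theorem get_sorcerer_max_spell_level_can_learn_spec : Claim_equal_get_sorcerer_max_spell_level_can_learn := by
  intro n _
  unfold Spec_get_sorcerer_max_spell_level_can_learn
  by_cases h : 1 ≤ n ∧ n ≤ 20
  · obtain ⟨h1, h2⟩ := h
    interval_cases n <;> decide
  · simp [get_sorcerer_max_spell_level_can_learn, get_sorcerer_max_spell_level_can_learn_alt, h]
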